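-- pv_equiv track=rewrite | github.com/kosa12/aoc2024 | 15/part.py | makeMoveDown
-- ===== SOURCE A (Python) =====
-- def makeMoveDown(map, object):
--     if map[object[0] + 1][object[1]] == ".":
--         if map[object[0]][object[1]] == "@":
--             map[object[0]][object[1]] = "."
--             map[object[0] + 1][object[1]] = "@"
--             return map, True
--         elif map[object[0]][object[1]] == "O":
--             map[object[0] + 1][object[1]] = map[object[0]][object[1]]
--         else:
--             raise Exception("Func called with not @ nor O.")
--         return map, True
--
--     if map[object[0] + 1][object[1]] == "#":
--         return map, False
--
--     if map[object[0] + 1][object[1]] == "O":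
--         map, b = makeMoveDown(map, [object[0] + 1, object[1]])
--         if b:
--             if map[object[0]][object[1]] == "@":
--                 map[object[0]][object[1]] = "."
--                 map[object[0] + 1][object[1]] = "@"
--                 return map, True
--             elif map[object[0]][object[1]] == ".":
--                 map[object[0]][object[1]] = map[object[0] - 1][object[1]]
--                 map[object[0] + 1][object[1]] = "O"
--                 return map, True
--             elif  map[object[0]][object[1]] == "O":
--                 return map, True
--
--     return map, False
-- ===== SOURCE B (Python) =====
-- def makeMoveDown(map, object):
--     # Uniform iterative version: one downward scan finds the first non-'O'
--     # cell; a free terminal gets the single deep 'O' write, then the top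
--     # cell's move is replayed.  The immediate-free-cell base case needs no
--     # special handling: the scan stops at once and the writes coincide.
--     # Mutates map in place like the original.
--     r, c = object[0], object[1]
--     t = r + 1
--     while map[t][c] == "O":
--         t += 1
--     if map[t][c] != ".":
--         return map, False
--     map[t][c] = "O"
--     top = map[r][c]
--     if top == "@":
--         map[r][c] = "."
--         map[r + 1][c] = "@"
--         return map, True
--     if top == ".":
--         map[r][c] = map[r - 1][c]
--         map[r + 1][c] = "O"
--         return map, True
--     if top == "O":
--         return map, True
--     return map, False
-- ===== Notes on version B (the rewrite author's own statement) =====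
-- stated objective: simpler
-- what changed: Replaces A's recursive descent (one call-stack frame and a fresh [row+1, col] list per box) and its duplicated base-case branch with a single iterative downward scan: one while loop finds the first non-'O' cell, a free terminal gets the one deep 'O' write, and the top cell's move is replayed once — the immediate-free-cell case needs no separate code because its writes coincide.
import Mathlib
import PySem

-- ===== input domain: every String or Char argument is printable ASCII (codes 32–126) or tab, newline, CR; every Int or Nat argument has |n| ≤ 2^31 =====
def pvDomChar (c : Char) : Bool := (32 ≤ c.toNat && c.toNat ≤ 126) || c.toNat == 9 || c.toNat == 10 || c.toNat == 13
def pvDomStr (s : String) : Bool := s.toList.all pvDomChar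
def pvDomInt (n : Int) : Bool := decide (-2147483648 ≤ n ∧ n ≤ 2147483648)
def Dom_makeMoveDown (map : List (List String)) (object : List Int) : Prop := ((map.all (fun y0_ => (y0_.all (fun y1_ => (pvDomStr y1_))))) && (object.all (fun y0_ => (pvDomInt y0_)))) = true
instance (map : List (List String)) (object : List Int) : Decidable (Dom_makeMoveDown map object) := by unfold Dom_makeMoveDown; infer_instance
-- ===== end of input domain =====

-- B replaces A's recursive descent by one uniform downward scan (the immediate-free-cell
-- base case needs no separate code); both mutate the grid in place, and the claim is about
-- the returned value (which contains the mutated grid).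

-- ===== PORT A =====
-- A-side grid accessors: map[i][c] read and write with Python's negative-index rule.
def pvCellA (m : List (List String)) (i c : Int) : Option String :=
  (PySem.List.pyGet? m i).bind (fun row => PySem.List.pyGet? row c)

def pvPutA (m : List (List String)) (i c : Int) (v : String) : List (List String) :=
  PySem.List.pySetD m i (PySem.List.pySetD ((PySem.List.pyGet? m i).getD []) c v)

-- termination helper for A's recursive descent (cited by decreasing_by)
theorem pvCellA_lt (m : List (List String)) (i c : Int) (x : String)
    (h : pvCellA m i c = some x) : i < (m.length : Int) := by
  unfold pvCellA at h
  cases hg : PySem.List.pyGet? m i with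
  | none => rw [hg] at h; simp at h
  | some row =>
    simp only [PySem.List.pyGet?, PySem.List.pyIdx?] at hg
    split_ifs at hg with h0 h1 h2 <;> simp_all <;> omega

def makeMoveDown (map : List (List String)) (object : List Int) : List (List String) × Bool :=
  match h0 : PySem.List.pyGet? object 0, PySem.List.pyGet? object 1 with
  | some r, some c =>
    match hb : pvCellA map (r + 1) c with
    | none => (map, false)                      -- IndexError (excluded by Pre_)
    | some below =>
      if below = "." then
        match pvCellA map r c with
        | none => (map, false)                  -- IndexError (excluded by Pre_)
        | some top =>
          if top = "@" then (pvPutA (pvPutA map r c ".") (r + 1) c "@", true)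
          else if top = "O" then (pvPutA map (r + 1) c top, true)
          else (map, false)                     -- raise Exception (excluded by Pre_)
      else if below = "#" then (map, false)
      else if hO : below = "O" then
        match makeMoveDown map [r + 1, c] with
        | (m, b) =>
          if b then
            match pvCellA m r c with
            | none => (m, false)                -- IndexError (excluded by Pre_)
            | some top =>
              if top = "@" then (pvPutA (pvPutA m r c ".") (r + 1) c "@", true)
              else if top = "." then
                match pvCellA m (r - 1) c with
                | none => (m, false)            -- IndexError (excluded by Pre_)
                | some above => (pvPutA (pvPutA m r c above) (r + 1) c "O", true)
              else if top = "O" then (m, true)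
              else (m, false)
          else (m, false)
      else (map, false)
  | _, _ => (map, false)                        -- IndexError on object (excluded by Pre_)
termination_by ((map.length : Int) - (PySem.List.pyGet? object 0).getD 0).toNat
decreasing_by
  have hr1 : (r + 1) < (map.length : Int) := pvCellA_lt map (r + 1) c below hb
  rw [PySem.List.pyGet?_zero_cons, h0]
  simp only [Option.getD_some]
  omega

-- ===== PORT B =====
-- B's grid read map[i][j] (Python negative-index rule), written in match style.
def bCell (m : List (List String)) (i j : Int) : Option String :=
  match PySem.List.pyGet? m i with
  | none => none
  | some row => PySem.List.pyGet? row j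

-- B's grid write map[i][j] = v: Python first evaluates map[i], then assigns into it.
def bPut (m : List (List String)) (i j : Int) (v : String) : List (List String) :=
  match PySem.List.pyGet? m i with
  | none => m                                   -- IndexError (excluded by Pre_)
  | some row => PySem.List.pySetD m i (PySem.List.pySetD row j v)

-- termination helper for B's while loop (cited by decreasing_by)
theorem bCell_lt (m : List (List String)) (i j : Int) (x : String)
    (h : bCell m i j = some x) : i < (m.length : Int) := by
  by_contra hge
  have hnone : PySem.List.pyGet? m i = none := by
    rw [PySem.List.pyGet?_eq_none_iff]
    intro hir
    exact hge hir.2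
  unfold bCell at h
  rw [hnone] at h
  simp at h

-- B's while loop fused with the terminal test and the deep write: scan down from t
-- through the run of "O" cells; a "." terminal yields the grid with that cell set to
-- "O", anything else (wall, out of range, other content) yields none.
def bSettle (m : List (List String)) (c t : Int) : Option (List (List String)) :=
  if h : bCell m t c = some "O" then bSettle m c (t + 1)
  else if bCell m t c = some "." then some (bPut m t c "O")
  else none
termination_by ((m.length : Int) - t).toNat
decreasing_by
  have := bCell_lt m t c "O" h
  omega

def makeMoveDown_alt (map : List (List String)) (object : List Int) : List (List String) × Bool :=
  match PySem.List.pyGet? object 0 with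
  | none => (map, false)                        -- IndexError on object (excluded by Pre_)
  | some r =>
    match PySem.List.pyGet? object 1 with
    | none => (map, false)                      -- IndexError on object (excluded by Pre_)
    | some c =>
    match bSettle map c (r + 1) with
    | none => (map, false)                      -- blocked run (or an IndexError, excluded by Pre_)
    | some m1 =>
      match bCell m1 r c with
      | none => (m1, false)                     -- IndexError (excluded by Pre_)
      | some top =>
        if top = "@" then (bPut (bPut m1 r c ".") (r + 1) c "@", true)
        else if top = "." then
          match bCell m1 (r - 1) c with
          | none => (m1, false)                 -- IndexError (excluded by Pre_)
          | some above => (bPut (bPut m1 r c above) (r + 1) c "O", true)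
        else if top = "O" then (m1, true)
        else (m1, false)

-- ===== PRECONDITION & SPEC =====
-- Pre_'s own grid reader (same Python map[i][c] rule; Pre_ shares nothing with the ports).
def pvCellP (m : List (List String)) (i c : Int) : Option String :=
  (PySem.List.pyGet? m i).bind (fun row => PySem.List.pyGet? row c)

-- Pre_ = exactly the inputs on which the Python A returns normally: object has the two
-- indices, every grid cell A's path reads exists (Python negative indexing allowed),
-- and the cell A starts from is '@'/'O' when the cell below is free (else A raises).
-- The last implication's clause 'r + len ≠ t' accounts for A reading map[r][c] AFTER
-- the terminal write when the wrapped row r aliases the terminal row t.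
def Pre_makeMoveDown (map : List (List String)) (object : List Int) : Prop :=
  2 ≤ object.length ∧
  (let r := PySem.List.pyGetD object 0 0
   let c := PySem.List.pyGetD object 1 0
   pvCellP map (r + 1) c ≠ none ∧
   (pvCellP map (r + 1) c = some "." →
      (pvCellP map r c = some "@" ∨ pvCellP map r c = some "O")) ∧
   (pvCellP map (r + 1) c = some "O" →
      ∃ k : Nat, k ≤ 2 * map.length ∧
        (∀ j : Nat, j < k → pvCellP map (r + 1 + (j : Int)) c = some "O") ∧
        pvCellP map (r + 1 + (k : Int)) c ≠ none ∧
        pvCellP map (r + 1 + (k : Int)) c ≠ some "O" ∧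
        (pvCellP map (r + 1 + (k : Int)) c = some "." →
          pvCellP map r c ≠ none ∧
          ((pvCellP map r c = some "." ∧ r + (map.length : Int) ≠ r + 1 + (k : Int)) →
            pvCellP map (r - 1) c ≠ none))))
instance (map : List (List String)) (object : List Int) : Decidable (Pre_makeMoveDown map object) := by
  unfold Pre_makeMoveDown; infer_instance

def pvWitness_makeMoveDown : List (List String) × List Int := ([["@"], ["."]], [0, 0])

def Spec_makeMoveDown (map : List (List String)) (object : List Int) (out : List (List String) × Bool) : Prop := out = makeMoveDown_alt map object
instance (map : List (List String)) (object : List Int) (out : List (List String) × Bool) : Decidable (Spec_makeMoveDown map object out) := by unfold Spec_makeMoveDown; infer_instance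

-- ===== CLAIM (what is proved, stated in full; the proofs are below) =====
def Claim_equal_makeMoveDown : Prop := ∀ (map : List (List String)) (object : List Int), Dom_makeMoveDown map object → Pre_makeMoveDown map object → Spec_makeMoveDown map object (makeMoveDown map object)

-- ===== LEMMAS AND PROOFS =====

-- B's accessor copies coincide with A's (different phrasings of the same Python access)
theorem cellEq : bCell = pvCellA := by
  funext m i j
  unfold bCell pvCellA
  cases PySem.List.pyGet? m i <;> rfl

theorem pvCellP_eq : pvCellP = pvCellA := rfl

theorem pyIdx?_lt {n : Nat} {i : Int} {k : Nat} (h : PySem.List.pyIdx? n i = some k) : k < n := by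
  unfold PySem.List.pyIdx? at h
  split_ifs at h <;> simp_all <;> omega

theorem putEq : bPut = pvPutA := by
  funext m i j v
  unfold bPut pvPutA
  cases hg : PySem.List.pyGet? m i with
  | none =>
    have hidx : PySem.List.pyIdx? m.length i = none := by
      unfold PySem.List.pyGet? at hg
      cases hk : PySem.List.pyIdx? m.length i with
      | none => rfl
      | some k =>
        rw [hk] at hg
        have := pyIdx?_lt hk
        simp [this] at hg
    simp [PySem.List.pySetD, PySem.List.pySet?, hidx]
  | some row => simp

theorem pyGet?_one_cons {α : Type} (x y : α) (xs : List α) :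
    PySem.List.pyGet? (x :: y :: xs) 1 = some y := by
  unfold PySem.List.pyGet? PySem.List.pyIdx?
  simp

theorem pyGetD_zero_cons' {α : Type} (x : α) (xs : List α) (d : α) :
    PySem.List.pyGetD (x :: xs) 0 d = x := by
  simp [PySem.List.pyGetD, PySem.List.pyGet?, PySem.List.pyIdx?]

theorem pyGetD_one_cons {α : Type} (x y : α) (xs : List α) (d : α) :
    PySem.List.pyGetD (x :: y :: xs) 1 d = y := by
  simp [PySem.List.pyGetD, PySem.List.pyGet?, PySem.List.pyIdx?]

-- one level of write-then-read: either j aliases i (same physical index) and reads v,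
-- or the read is untouched
theorem pyGet?_pySetD_cases {α : Type} (xs : List α) (i j : Int) (v : α) :
    (PySem.List.pyGet? (PySem.List.pySetD xs i v) j = some v ∧
      ∃ x, PySem.List.pyGet? xs i = some x ∧ PySem.List.pyGet? xs j = some x) ∨
    PySem.List.pyGet? (PySem.List.pySetD xs i v) j = PySem.List.pyGet? xs j := by
  unfold PySem.List.pySetD PySem.List.pySet? PySem.List.pyGet?
  cases hi : PySem.List.pyIdx? xs.length i with
  | none => right; simp
  | some ki =>
    have hki : ki < xs.length := pyIdx?_lt hi
    simp only [Option.map_some, Option.getD_some, List.length_set]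
    cases hj : PySem.List.pyIdx? xs.length j with
    | none => right; simp
    | some kj =>
      have hkj : kj < xs.length := pyIdx?_lt hj
      by_cases hk : kj = ki
      · left
        subst hk
        refine ⟨by simp [hkj], xs[kj], ?_, ?_⟩ <;> simp [hkj]
      · right
        simp [List.getElem?_set_ne (fun h => hk h.symm)]

theorem cellPut_cases (m : List (List String)) (i j c : Int) (v : String) :
    pvCellA (pvPutA m i c v) j c = some v ∨ pvCellA (pvPutA m i c v) j c = pvCellA m j c := by
  unfold pvCellA pvPutA
  rcases pyGet?_pySetD_cases m i j
      (PySem.List.pySetD ((PySem.List.pyGet? m i).getD []) c v) with ⟨h1, x, hx, hxj⟩ | h1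
  · rw [h1, hx, hxj]
    simp only [Option.getD_some, Option.bind_some]
    rcases pyGet?_pySetD_cases x c c v with ⟨h2, _⟩ | h2
    · left; exact h2
    · right; exact h2
  · right; rw [h1]

-- A's step function with the object list already destructured (proof-side restatement)
def pvStepA (map : List (List String)) (r c : Int) : List (List String) × Bool :=
  match pvCellA map (r + 1) c with
  | none => (map, false)
  | some below =>
    if below = "." then
      match pvCellA map r c with
      | none => (map, false)
      | some top =>
        if top = "@" then (pvPutA (pvPutA map r c ".") (r + 1) c "@", true)
        else if top = "O" then (pvPutA map (r + 1) c top, true)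
        else (map, false)
    else if below = "#" then (map, false)
    else if _h : below = "O" then
      (if (makeMoveDown map [r + 1, c]).2 = true then
        match pvCellA (makeMoveDown map [r + 1, c]).1 r c with
        | none => ((makeMoveDown map [r + 1, c]).1, false)
        | some top =>
          if top = "@" then
            (pvPutA (pvPutA (makeMoveDown map [r + 1, c]).1 r c ".") (r + 1) c "@", true)
          else if top = "." then
            match pvCellA (makeMoveDown map [r + 1, c]).1 (r - 1) c with
            | none => ((makeMoveDown map [r + 1, c]).1, false)
            | some above => (pvPutA (pvPutA (makeMoveDown map [r + 1, c]).1 r c above) (r + 1) c "O", true)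
          else if top = "O" then ((makeMoveDown map [r + 1, c]).1, true)
          else ((makeMoveDown map [r + 1, c]).1, false)
      else ((makeMoveDown map [r + 1, c]).1, false))
    else (map, false)

theorem makeMoveDown_cons (map : List (List String)) (r c : Int) (rest : List Int) :
    makeMoveDown map (r :: c :: rest) = pvStepA map r c := by
  rw [makeMoveDown.eq_def]
  split
  · next _ r1 c1 h0 h1 =>
      rw [PySem.List.pyGet?_zero_cons] at h0
      rw [pyGet?_one_cons] at h1
      injection h0 with h0
      injection h1 with h1
      subst h0; subst h1
      unfold pvStepA
      split
      · next hbn => rw [hbn]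
      · next below hbs => rw [hbs]
  · next _ h =>
      exact (h r c (by rw [PySem.List.pyGet?_zero_cons]) (by rw [pyGet?_one_cons])).elim

theorem makeMoveDown_nil (map : List (List String)) : makeMoveDown map [] = (map, false) := by
  rw [makeMoveDown.eq_def]
  split
  · next _ _ _ h0 _ =>
      simp [PySem.List.pyGet?, PySem.List.pyIdx?] at h0
  · rfl

theorem makeMoveDown_one (map : List (List String)) (a : Int) :
    makeMoveDown map [a] = (map, false) := by
  rw [makeMoveDown.eq_def]
  split
  · next _ _ _ _ h1 =>
      simp [PySem.List.pyGet?, PySem.List.pyIdx?] at h1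
  · rfl

-- unfolding equations for bSettle
theorem bSettle_step (m : List (List String)) (c t : Int) (h : pvCellA m t c = some "O") :
    bSettle m c t = bSettle m c (t + 1) := by
  rw [bSettle.eq_def]
  simp [cellEq, h]

theorem bSettle_stop (m : List (List String)) (c t : Int) (h : ¬ pvCellA m t c = some "O") :
    bSettle m c t =
      (if pvCellA m t c = some "." then some (pvPutA m t c "O") else none) := by
  rw [bSettle.eq_def]
  simp [cellEq, putEq, h]

-- a successful settle is one deep write of "O"
theorem bSettle_shape (m : List (List String)) (c : Int) : ∀ (n : Nat) (t : Int),
    ((m.length : Int) - t).toNat ≤ n →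
    ∀ m1, bSettle m c t = some m1 → ∃ u, m1 = pvPutA m u c "O" := by
  intro n
  induction n with
  | zero =>
    intro t hn m1 h
    by_cases hO : pvCellA m t c = some "O"
    · have := pvCellA_lt m t c "O" hO
      omega
    · rw [bSettle_stop m c t hO] at h
      by_cases hd : pvCellA m t c = some "."
      · rw [if_pos hd] at h
        exact ⟨t, (Option.some_inj.mp h).symm⟩
      · rw [if_neg hd] at h
        simp at h
  | succ n ih =>
    intro t hn m1 h
    by_cases hO : pvCellA m t c = some "O"
    · have := pvCellA_lt m t c "O" hO
      rw [bSettle_step m c t hO] at h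
      exact ih (t + 1) (by omega) m1 h
    · rw [bSettle_stop m c t hO] at h
      by_cases hd : pvCellA m t c = some "."
      · rw [if_pos hd] at h
        exact ⟨t, (Option.some_inj.mp h).symm⟩
      · rw [if_neg hd] at h
        simp at h

-- A's recursion, entered on a box cell, is exactly B's settle from the row below
theorem recA (map : List (List String)) (c : Int) : ∀ (n : Nat) (r : Int),
    ((map.length : Int) - r).toNat ≤ n → pvCellA map r c = some "O" →
    makeMoveDown map [r, c] =
      (match bSettle map c (r + 1) with
       | some m1 => (m1, true)
       | none => (map, false)) := by
  intro n
  induction n with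
  | zero =>
    intro r hn htop
    have := pvCellA_lt map r c "O" htop
    omega
  | succ n ih =>
    intro r hn htop
    have hrlt := pvCellA_lt map r c "O" htop
    rw [makeMoveDown_cons]
    unfold pvStepA
    cases hb : pvCellA map (r + 1) c with
    | none =>
      rw [bSettle_stop map c (r + 1) (by rw [hb]; simp), hb]
      simp
    | some below =>
      by_cases hdot : below = "."
      · subst hdot
        rw [bSettle_stop map c (r + 1) (by rw [hb]; decide), hb, htop]
        simp [(by decide : ¬("O" : String) = "@")]
      · by_cases hhash : below = "#"
        · subst hhash
          rw [bSettle_stop map c (r + 1) (by rw [hb]; decide), hb]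
          simp [hdot]
        · by_cases hO : below = "O"
          · subst hO
            have hr1 := pvCellA_lt map (r + 1) c "O" hb
            have hrec := ih (r + 1) (by omega) hb
            rw [bSettle_step map c (r + 1) hb]
            simp only [hdot, hhash, if_false]
            cases hs : bSettle map c (r + 1 + 1) with
            | none =>
              simp only [hs] at hrec
              rw [hrec]
              simp
            | some m1 =>
              simp only [hs] at hrec
              rw [hrec]
              obtain ⟨u, hu⟩ :=
                bSettle_shape map c ((map.length : Int) - (r + 1 + 1)).toNat (r + 1 + 1)
                  (le_refl _) m1 hs
              have htop1 : pvCellA m1 r c = some "O" := by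
                subst hu
                rcases cellPut_cases map u r c "O" with h | h
                · exact h
                · rw [h, htop]
              rw [htop1]
              simp [(by decide : ¬("O" : String) = "@"), (by decide : ¬("O" : String) = ".")]
          · rw [bSettle_stop map c (r + 1) (by rw [hb]; simp [hO]), hb]
            simp [hdot, hhash, hO]

-- physical form of a write: set at the wrapped index
theorem put_spec (m : List (List String)) (i c : Int) (v : String) {k : Nat}
    (h : PySem.List.pyIdx? m.length i = some k) :
    pvPutA m i c v = m.set k (PySem.List.pySetD (m.getD k []) c v) := by
  have hk : k < m.length := pyIdx?_lt h
  unfold pvPutA PySem.List.pySetD PySem.List.pySet? PySem.List.pyGet?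
  rw [h]
  simp [List.getD_eq_getElem?_getD, List.getElem?_eq_getElem hk]

-- overwriting the same 1-D slot twice keeps only the second write
theorem setD_setD (row : List String) (c : Int) (v w : String) :
    PySem.List.pySetD (PySem.List.pySetD row c v) c w = PySem.List.pySetD row c w := by
  unfold PySem.List.pySetD PySem.List.pySet?
  cases hk : PySem.List.pyIdx? row.length c with
  | none => simp [hk]
  | some k =>
    simp only [List.length_set, hk, Option.map_some, Option.getD_some, List.set_set]

-- identical physical indices read identical cells
theorem pyGet?_congr_idx {α : Type} (xs : List α) (i j : Int)
    (h : PySem.List.pyIdx? xs.length i = PySem.List.pyIdx? xs.length j) :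
    PySem.List.pyGet? xs i = PySem.List.pyGet? xs j := by
  unfold PySem.List.pyGet?
  rw [h]

-- a read succeeds only through a physical index
theorem cell_idx (m : List (List String)) (i c : Int) (x : String)
    (h : pvCellA m i c = some x) : ∃ k, PySem.List.pyIdx? m.length i = some k := by
  unfold pvCellA PySem.List.pyGet? at h
  cases hk : PySem.List.pyIdx? m.length i with
  | none => rw [hk] at h; simp at h
  | some k => exact ⟨k, rfl⟩

-- reading a row other than the one just written is unchanged
theorem cell_put_ne (m : List (List String)) (i j c : Int) (v : String)
    {ki kj : Nat} (hi : PySem.List.pyIdx? m.length i = some ki)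
    (hj : PySem.List.pyIdx? m.length j = some kj) (hne : ki ≠ kj) :
    pvCellA (pvPutA m i c v) j c = pvCellA m j c := by
  rw [put_spec m i c v hi]
  unfold pvCellA PySem.List.pyGet?
  rw [List.length_set, hj]
  simp only [Option.bind_some]
  rw [List.getElem?_set_ne hne]

-- the write algebra for the base '@' move: the scan's 'O' write below is overwritten
theorem put_base_at (map : List (List String)) (a b : Int) {ka kb : Nat}
    (hA : PySem.List.pyIdx? map.length a = some ka)
    (hB : PySem.List.pyIdx? map.length (a + 1) = some kb) (hne : ka ≠ kb) :
    pvPutA (pvPutA (pvPutA map (a + 1) b "O") a b ".") (a + 1) b "@" =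
      pvPutA (pvPutA map a b ".") (a + 1) b "@" := by
  have hka : ka < map.length := pyIdx?_lt hA
  have hkb : kb < map.length := pyIdx?_lt hB
  have len1 : (pvPutA map (a + 1) b "O").length = map.length := by
    rw [put_spec map (a + 1) b "O" hB, List.length_set]
  have len2 : (pvPutA map a b ".").length = map.length := by
    rw [put_spec map a b "." hA, List.length_set]
  rw [put_spec map (a + 1) b "O" hB]
  rw [put_spec _ a b "." (by rw [List.length_set]; exact hA)]
  rw [put_spec _ (a + 1) b "@" (by rw [List.length_set, List.length_set]; exact hB)]
  rw [put_spec map a b "." hA]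
  rw [put_spec _ (a + 1) b "@" (by rw [List.length_set]; exact hB)]
  have g1 : (map.set kb (PySem.List.pySetD (map.getD kb []) b "O")).getD ka [] = map.getD ka [] := by
    rw [List.getD_eq_getElem?_getD, List.getElem?_set_ne (fun h => hne h.symm),
      List.getD_eq_getElem?_getD]
  have g2 : ((map.set kb (PySem.List.pySetD (map.getD kb []) b "O")).set ka
      (PySem.List.pySetD (map.getD ka []) b ".")).getD kb [] =
      PySem.List.pySetD (map.getD kb []) b "O" := by
    rw [List.getD_eq_getElem?_getD, List.getElem?_set_ne hne,
      List.getElem?_set_self hkb]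
    rfl
  have g3 : (map.set ka (PySem.List.pySetD (map.getD ka []) b ".")).getD kb [] =
      map.getD kb [] := by
    rw [List.getD_eq_getElem?_getD, List.getElem?_set_ne hne, List.getD_eq_getElem?_getD]
  rw [g1, g2, g3, setD_setD]
  rw [List.set_comm _ _ (fun h => hne h), List.set_set]
  exact List.set_comm _ _ (fun h => hne h.symm)

-- ===== VERDICT (by name: the statement is the Claim_ definition above) =====
theorem makeMoveDown_spec : Claim_equal_makeMoveDown := by
  intro map object _ hpre
  unfold Spec_makeMoveDown
  rcases object with _ | ⟨a, _ | ⟨b, rest⟩⟩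
  · rw [makeMoveDown_nil, makeMoveDown_alt.eq_def]
    simp [PySem.List.pyGet?, PySem.List.pyIdx?]
  · rw [makeMoveDown_one, makeMoveDown_alt.eq_def]
    simp [PySem.List.pyGet?, PySem.List.pyIdx?]
  · rw [makeMoveDown_cons, makeMoveDown_alt.eq_def]
    unfold pvStepA
    simp only [PySem.List.pyGet?_zero_cons, pyGet?_one_cons]
    obtain ⟨-, hpre2⟩ := hpre
    rw [pyGetD_zero_cons', pyGetD_one_cons] at hpre2
    obtain ⟨-, hbase, -⟩ := hpre2
    rw [pvCellP_eq] at hbase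
    cases hb : pvCellA map (a + 1) b with
    | none =>
      rw [bSettle_stop map b (a + 1) (by rw [hb]; simp), hb]
      simp
    | some below =>
      by_cases hdot : below = "."
      · subst hdot
        rw [bSettle_stop map b (a + 1) (by rw [hb]; decide), hb, cellEq, putEq]
        rcases hbase hb with htop | htop
        · -- top is '@': both move the player; the scan's 'O' write is overwritten
          obtain ⟨ka, hA⟩ := cell_idx map a b "@" htop
          obtain ⟨kb, hB⟩ := cell_idx map (a + 1) b "." hb
          have hne : ka ≠ kb := by
            intro he
            have hgg : pvCellA map a b = pvCellA map (a + 1) b := by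
              unfold pvCellA
              rw [pyGet?_congr_idx map a (a + 1) (by rw [hA, hB, he])]
            rw [htop, hb] at hgg
            exact absurd (Option.some_inj.mp hgg) (by decide)
          have hread := cell_put_ne map (a + 1) a b "O" hB hA (fun h => hne h.symm)
          rw [htop] at hread
          simp [htop, hread, put_base_at map a b hA hB hne]
        · -- top is 'O': the scan's single write below is exactly A's copy-down
          rcases cellPut_cases map (a + 1) a b "O" with h | h
          · simp [htop, h]
          · rw [htop] at h
            simp [htop, h]
      · by_cases hhash : below = "#"
        · subst hhash
          rw [bSettle_stop map b (a + 1) (by rw [hb]; decide), hb]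
          simp [hdot]
        · by_cases hO : below = "O"
          · subst hO
            have hrec := recA map b ((map.length : Int) - (a + 1)).toNat (a + 1) (le_refl _) hb
            rw [bSettle_step map b (a + 1) hb]
            simp only [hdot, hhash, if_false]
            cases hs : bSettle map b (a + 1 + 1) with
            | none =>
              simp only [hs] at hrec
              rw [hrec]
              simp
            | some m1 =>
              simp only [hs] at hrec
              rw [hrec]
              simp [cellEq, putEq]
          · rw [bSettle_stop map b (a + 1) (by rw [hb]; simp [hO]), hb]
            simp [hdot, hhash, hO]
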